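-- pv_equiv track=rewrite | github.com/rajeshmessi10/rajeshmessi10 | fibanocci_reverse_from8thelementtoend.py | fib_reversed
-- ===== SOURCE A (Python) =====
-- def fib_reversed(num):
--     new = [0,1]
--     org = [0,1]
--     if num >= 9:
--         for _ in range(num-2):
--             if len(new) < 8:
--                 new.append(new[-1] + new[-2])
--             else:
--                 new.append(int(str(new[-1])[::-1]) + int(str(new[-2])[::-1]))
--         for _ in range(num - 2):
--             org.append(org[-1] + org[-2])
--         return new[-1] - org[-1]
--     return 0
-- ===== SOURCE B (Python) =====
-- def fib_reversed(num):
--     if num < 9: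
--         return 0
--     # reversed tail: the first eight terms 0,1,1,2,3,5,8,13 are plain Fibonacci,
--     # so start directly from the constant seed (8, 13) and apply num-8 digit-reversed steps
--     a, b = 8, 13
--     for _ in range(num - 8):
--         a, b = b, int(str(b)[::-1]) + int(str(a)[::-1])
--     # normal Fibonacci F(num-1) by fast doubling (n is always >= 0 here)
--     def fd(n):
--         if n == 0:
--             return (0, 1)
--         f, g = fd(n >> 1)
--         c = f * (2 * g - f)
--         d = f * f + g * g
--         if n & 1:
--             return (d, c + d)
--         return (c, d)
--     return b - fd(num - 1)[0]
-- ===== Notes on version B (the rewrite author's own statement) =====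
-- stated objective: alternative
-- what changed: B skips the plain phase entirely by starting the reversed tail from the constant seed (8, 13) it always reaches, iterates only the num-8 digit-reversed steps over a scalar pair, and computes the normal Fibonacci term F(num-1) by recursive fast doubling instead of a linear list-building loop.
import Mathlib
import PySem

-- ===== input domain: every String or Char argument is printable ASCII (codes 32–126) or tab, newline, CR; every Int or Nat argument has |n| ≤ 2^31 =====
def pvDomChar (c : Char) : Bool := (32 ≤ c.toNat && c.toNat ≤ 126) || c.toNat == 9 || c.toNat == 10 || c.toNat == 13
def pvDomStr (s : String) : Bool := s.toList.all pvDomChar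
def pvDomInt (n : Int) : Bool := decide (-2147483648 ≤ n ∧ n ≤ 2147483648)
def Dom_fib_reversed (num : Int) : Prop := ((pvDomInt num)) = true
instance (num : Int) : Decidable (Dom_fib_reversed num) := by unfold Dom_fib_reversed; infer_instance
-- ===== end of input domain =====

-- B starts the reversed tail from the constant seed (8, 13) (skipping the plain phase) and computes
-- the normal Fibonacci term by recursive fast doubling instead of a linear list-building loop.

-- ===== PORT A =====
-- int(str(n)[::-1]); the .getD 0 is unreachable here: both programs only apply it to nonnegative values
def pvRevInt (n : Int) : Int :=
  ((PySem.Str.slice? (PySem.Int.toStr n) none none (-1)).bind PySem.Int.ofStr?).getD 0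

-- loop body of A's first loop: append next (reversed-)Fibonacci term
def pvStepNew (xs : List Int) : List Int :=
  if xs.length < 8 then
    xs ++ [PySem.List.pyGetD xs (-1) 0 + PySem.List.pyGetD xs (-2) 0]
  else
    xs ++ [pvRevInt (PySem.List.pyGetD xs (-1) 0) + pvRevInt (PySem.List.pyGetD xs (-2) 0)]

-- loop body of A's second loop: append next Fibonacci term
def pvStepOrg (xs : List Int) : List Int :=
  xs ++ [PySem.List.pyGetD xs (-1) 0 + PySem.List.pyGetD xs (-2) 0]

def fib_reversed (num : Int) : Int :=
  let new0 : List Int := [0, 1]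
  let org0 : List Int := [0, 1]
  if num ≥ 9 then
    let new := (PySem.List.pyRange 0 (num - 2) 1).foldl (fun xs _ => pvStepNew xs) new0
    let org := (PySem.List.pyRange 0 (num - 2) 1).foldl (fun xs _ => pvStepOrg xs) org0
    PySem.List.pyGetD new (-1) 0 - PySem.List.pyGetD org (-1) 0
  else 0

-- ===== PORT B =====
-- one digit-reversed step on the scalar pair (a, b) ↦ (b, rev b + rev a)
def pvRevStep (p : Int × Int) : Int × Int := (p.2, pvRevInt p.2 + pvRevInt p.1)

-- fast doubling fd(n) = (F(n), F(n+1)); B only calls it with n = num-1 ≥ 8, so a Nat argument is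
-- faithful to the Python (n >> 1 = n / 2 and n & 1 = n % 2 on nonnegative n)
def pvFd : Nat → Int × Int
  | 0 => (0, 1)
  | n + 1 =>
    let fg := pvFd ((n + 1) / 2)
    let c := fg.1 * (2 * fg.2 - fg.1)
    let d := fg.1 * fg.1 + fg.2 * fg.2
    if (n + 1) % 2 = 1 then (d, c + d) else (c, d)
  decreasing_by exact Nat.div_lt_self (Nat.succ_pos n) (by norm_num)

def fib_reversed_alt (num : Int) : Int :=
  if num < 9 then 0
  else
    let p := (PySem.List.pyRange 0 (num - 8) 1).foldl (fun p _ => pvRevStep p) (8, 13)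
    p.2 - (pvFd (num - 1).toNat).1

-- ===== PRECONDITION & SPEC =====
def Spec_fib_reversed (num : Int) (out : Int) : Prop := out = fib_reversed_alt num
instance (num : Int) (out : Int) : Decidable (Spec_fib_reversed num out) := by unfold Spec_fib_reversed; infer_instance

-- ===== CLAIM (what is proved, stated in full; the proofs are below) =====
def Claim_equal_fib_reversed : Prop := ∀ (num : Int), Dom_fib_reversed num → Spec_fib_reversed num (fib_reversed num)

-- ===== LEMMAS AND PROOFS =====

-- a foldl whose body ignores the list element is an iterate of the body
lemma pv_foldl_const {α σ : Type} (f : σ → σ) (l : List α) (s : σ) :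
    List.foldl (fun s _ => f s) s l = f^[l.length] s := by
  induction l generalizing s with
  | nil => rfl
  | cons x xs ih => simp [List.foldl, ih, Function.iterate_succ_apply]

lemma pv_pyGetD_pair_neg_one (u : List Int) (x y : Int) :
    PySem.List.pyGetD (u ++ [x, y]) (-1) 0 = y := by
  have : u ++ [x, y] = (u ++ [x]) ++ [y] := by simp
  rw [this, PySem.List.pyGetD_neg_one_append_singleton]

lemma pv_pyGetD_pair_neg_two (u : List Int) (x y : Int) :
    PySem.List.pyGetD (u ++ [x, y]) (-2) 0 = x := by
  rw [PySem.List.pyGetD_neg_ofNat _ 2 0 (by omega) (by simp)]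
  simp

-- fast doubling computes Fibonacci pairs
lemma pv_fd_eq : ∀ n : Nat, pvFd n = ((Nat.fib n : Int), (Nat.fib (n + 1) : Int)) := by
  intro n
  induction n using Nat.strong_induction_on with
  | _ n ih =>
    match n with
    | 0 => simp [pvFd]
    | n + 1 =>
      rw [pvFd]
      rw [ih ((n + 1) / 2) (Nat.div_lt_self (Nat.succ_pos n) (by norm_num))]
      set k := (n + 1) / 2 with hk
      have hfle : Nat.fib k ≤ 2 * Nat.fib (k + 1) :=
        le_trans (Nat.fib_le_fib_succ) (by omega)
      have hc : ((Nat.fib k : Int)) * (2 * (Nat.fib (k + 1) : Int) - (Nat.fib k : Int))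
          = ((Nat.fib (2 * k) : Int)) := by
        rw [Nat.fib_two_mul]; push_cast [hfle]; ring
      have hd : ((Nat.fib k : Int)) * (Nat.fib k : Int) + (Nat.fib (k + 1) : Int) * (Nat.fib (k + 1) : Int)
          = ((Nat.fib (2 * k + 1) : Int)) := by
        rw [Nat.fib_two_mul_add_one]; push_cast; ring
      by_cases hpar : (n + 1) % 2 = 1
      · have h2k : 2 * k + 1 = n + 1 := by omega
        rw [if_pos hpar]
        simp only [hc, hd]
        have hsum : (Nat.fib (2 * k) : Int) + (Nat.fib (2 * k + 1) : Int) = (Nat.fib (2 * k + 2) : Int) := by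
          have := Nat.fib_add_two (n := 2 * k); push_cast [this]; ring
        rw [h2k] at hsum ⊢
        rw [Prod.mk.injEq]
        exact ⟨rfl, by rw [show n + 1 + 1 = 2 * k + 2 from by omega, ← hsum]⟩
      · have h2k : 2 * k = n + 1 := by omega
        rw [if_neg hpar]
        simp only [hc, hd]
        rw [show 2 * k = n + 1 from h2k]

-- A's second loop: after n steps the list ends with the Fibonacci pair (F n, F (n+1))
lemma pv_org_inv : ∀ n : Nat, ∃ u : List Int,
    pvStepOrg^[n] [0, 1] = u ++ [(Nat.fib n : Int), (Nat.fib (n + 1) : Int)] ∧ u.length = n := by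
  intro n
  induction n with
  | zero => exact ⟨[], rfl, rfl⟩
  | succ m ih =>
    obtain ⟨u, hu, hl⟩ := ih
    refine ⟨u ++ [(Nat.fib m : Int)], ?_, by simp [hl]⟩
    rw [Function.iterate_succ_apply', hu]
    unfold pvStepOrg
    rw [pv_pyGetD_pair_neg_one, pv_pyGetD_pair_neg_two]
    have : (Nat.fib (m + 1) : Int) + (Nat.fib m : Int) = (Nat.fib (m + 2) : Int) := by
      have := Nat.fib_add_two (n := m); push_cast [this]; ring
    simp [this]

-- the first six steps of A's first loop are plain Fibonacci, ending in 8, 13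
lemma pv_new6 : pvStepNew^[6] [0, 1] = [0, 1, 1, 2, 3, 5, 8, 13] := by decide

-- from the seed list onward A's first loop tracks B's scalar pair
lemma pv_new_inv : ∀ m : Nat, ∃ u : List Int,
    pvStepNew^[m] [0, 1, 1, 2, 3, 5, 8, 13]
      = u ++ [(pvRevStep^[m] (8, 13)).1, (pvRevStep^[m] (8, 13)).2] ∧ u.length = m + 6 := by
  intro m
  induction m with
  | zero => exact ⟨[0, 1, 1, 2, 3, 5], rfl, rfl⟩
  | succ k ih =>
    obtain ⟨u, hu, hl⟩ := ih
    refine ⟨u ++ [(pvRevStep^[k] (8, 13)).1], ?_, by simp [hl]⟩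
    rw [Function.iterate_succ_apply', hu, Function.iterate_succ_apply']
    unfold pvStepNew
    have hlen : ¬ ((u ++ [(pvRevStep^[k] (8, 13)).1, (pvRevStep^[k] (8, 13)).2]).length < 8) := by
      simp [hl]
    rw [if_neg hlen, pv_pyGetD_pair_neg_one, pv_pyGetD_pair_neg_two]
    simp [pvRevStep]

-- ===== VERDICT (by name: the statement is the Claim_ definition above) =====
theorem fib_reversed_spec : Claim_equal_fib_reversed := by
  intro num _
  unfold Spec_fib_reversed fib_reversed fib_reversed_alt
  by_cases h : num ≥ 9
  · rw [if_pos h, if_neg (by omega)]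
    simp only [pv_foldl_const, PySem.List.length_pyRange_one]
    have hN : (num - 2 - 0).toNat = (num - 8 - 0).toNat + 6 := by omega
    rw [hN, Function.iterate_add_apply, pv_new6]
    obtain ⟨u, hu, _⟩ := pv_new_inv (num - 8 - 0).toNat
    obtain ⟨v, hv, _⟩ := pv_org_inv ((num - 8 - 0).toNat + 6)
    rw [hu, hv, pv_pyGetD_pair_neg_one, pv_pyGetD_pair_neg_one, pv_fd_eq]
    have : (num - 1).toNat = ((num - 8 - 0).toNat + 6) + 1 := by omega
    rw [this]
  · rw [if_neg h, if_pos (by omega)]
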